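-- pv_equiv track=rewrite | github.com/Xilinion/TPHT-Figure-Tex | in_text_data/in_text_data.py | make_latex_safe_name
-- ===== SOURCE A (Python) =====
-- def make_latex_safe_name(name: str) -> str:
--     """Convert a name to be LaTeX-safe for use in newcommand."""
--     # Keep only the base name but convert numbers to words
--     number_words = {
--         '0': 'zero', '1': 'one', '2': 'two', '3': 'three', '4': 'four',
--         '5': 'five', '6': 'six', '7': 'seven', '8': 'eight', '9': 'nine'
--     }
--
--     # Replace underscores with nothing (keep original name structure)
--     latex_name = name.replace("_", "")
--
--     # Replace numbers with words
--     for digit, word in number_words.items():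
--         latex_name = latex_name.replace(digit, word)
--
--     # Remove other invalid characters
--     latex_name = latex_name.replace("-", "")
--     latex_name = latex_name.replace(".", "")
--     latex_name = latex_name.replace(" ", "")
--
--     # Ensure it starts with a letter (should be fine now since we convert numbers)
--     if latex_name and not latex_name[0].isalpha():
--         latex_name = "data" + latex_name
--
--     return latex_name
-- ===== SOURCE B (Python) =====
-- _TABLE = str.maketrans({
--     '0': 'zero', '1': 'one', '2': 'two', '3': 'three', '4': 'four',
--     '5': 'five', '6': 'six', '7': 'seven', '8': 'eight', '9': 'nine',
--     '_': None, '-': None, '.': None, ' ': None,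
-- })
--
--
-- def make_latex_safe_name(name: str) -> str:
--     """Convert a name to be LaTeX-safe for use in newcommand."""
--     latex_name = name.translate(_TABLE)
--     if latex_name and not latex_name[0].isalpha():
--         latex_name = "data" + latex_name
--     return latex_name
-- ===== Notes on version B (the rewrite author's own statement) =====
-- stated objective: idiomatic
-- what changed: B replaces A's 14 sequential whole-string .replace passes by a single str.translate pass over a precomputed per-character table (digits -> spelled-out words, separators -> deleted, everything else kept), then the same leading-character guard.
import Mathlib
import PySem

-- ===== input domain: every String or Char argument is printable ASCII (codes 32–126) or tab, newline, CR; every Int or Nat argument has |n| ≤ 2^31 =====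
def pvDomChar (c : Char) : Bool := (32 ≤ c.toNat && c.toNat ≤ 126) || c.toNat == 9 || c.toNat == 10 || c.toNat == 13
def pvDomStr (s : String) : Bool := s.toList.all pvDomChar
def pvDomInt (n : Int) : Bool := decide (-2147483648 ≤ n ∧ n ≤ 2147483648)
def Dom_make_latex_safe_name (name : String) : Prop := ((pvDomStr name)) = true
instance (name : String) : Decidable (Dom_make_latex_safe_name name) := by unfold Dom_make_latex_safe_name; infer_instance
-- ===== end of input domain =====

-- B replaces A's 14 sequential whole-string replace passes by one str.translate pass over a per-character table (digit -> word, separator -> deleted, else kept); idiomatic single-pass decomposition, proved equal on all inputs.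


-- ===== PORT A =====
-- the dict literal `number_words` of the Python A
def pvNumberWords : PySem.Dict String String :=
  PySem.Dict.ofList [("0","zero"),("1","one"),("2","two"),("3","three"),("4","four"),
                     ("5","five"),("6","six"),("7","seven"),("8","eight"),("9","nine")]

-- A's final guard: if latex_name and not latex_name[0].isalpha(): latex_name = "data" + latex_name
def pvGuardA (latex_name : String) : String :=
  match latex_name.toList with
  | [] => latex_name
  | c :: _ => if PySem.Chars.isalpha c then latex_name
              else String.ofList ("data".toList ++ latex_name.toList)

-- A's successive rebindings of latex_name written as a nested application
def make_latex_safe_name (name : String) : String :=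
  pvGuardA
    (PySem.Str.replace (PySem.Str.replace (PySem.Str.replace
      (pvNumberWords.items.foldl (fun s dw => PySem.Str.replace s dw.1 dw.2)
        (PySem.Str.replace name "_" "")) "-" "") "." "") " " "")

-- ===== PORT B =====
-- B's translation table _TABLE: per-character mapping (str.translate maps each character
-- to a replacement string, the empty list meaning deletion); ported as a Char → List Char function
def pvTable (c : Char) : List Char :=
  if c = '0' then "zero".toList
  else if c = '1' then "one".toList
  else if c = '2' then "two".toList
  else if c = '3' then "three".toList
  else if c = '4' then "four".toList
  else if c = '5' then "five".toList
  else if c = '6' then "six".toList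
  else if c = '7' then "seven".toList
  else if c = '8' then "eight".toList
  else if c = '9' then "nine".toList
  else if c = '_' ∨ c = '-' ∨ c = '.' ∨ c = ' ' then []
  else [c]

-- B's guard on the translated character list
def pvGuardB (core : List Char) : String :=
  match core with
  | [] => String.ofList core
  | c :: _ => if PySem.Chars.isalpha c then String.ofList core
              else String.ofList ("data".toList ++ core)

-- str.translate is exactly one pass mapping each character through the table and concatenating
def make_latex_safe_name_alt (name : String) : String :=
  pvGuardB (name.toList.flatMap pvTable)

-- ===== PRECONDITION & SPEC =====
def Spec_make_latex_safe_name (name : String) (out : String) : Prop := out = make_latex_safe_name_alt name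
instance (name : String) (out : String) : Decidable (Spec_make_latex_safe_name name out) := by unfold Spec_make_latex_safe_name; infer_instance

-- ===== CLAIM (what is proved, stated in full; the proofs are below) =====
def Claim_equal_make_latex_safe_name : Prop := ∀ (name : String), Dom_make_latex_safe_name name → Spec_make_latex_safe_name name (make_latex_safe_name name)

-- ===== LEMMAS AND PROOFS =====

-- replace.go with a single-character pattern is a per-character flatMap
theorem pv_go (c : Char) (new : List Char) :
    ∀ (fuel : Nat) (l acc : List Char), l.length ≤ fuel →
      PySem.Chars.replace.go [c] new fuel l acc
        = acc.reverse ++ l.flatMap (fun x => if x = c then new else [x]) := by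
  intro fuel
  induction fuel with
  | zero =>
    intro l acc h
    have : l = [] := List.eq_nil_of_length_eq_zero (Nat.le_zero.mp h)
    subst this; simp [PySem.Chars.replace.go]
  | succ n ih =>
    intro l acc h
    cases l with
    | nil => simp [PySem.Chars.replace.go]
    | cons c' t =>
      simp only [PySem.Chars.replace.go]
      by_cases hc : c' = c
      · subst hc
        simp only [List.isPrefixOf, BEq.rfl, Bool.true_and, if_true]
        rw [ih _ _ (by simpa using Nat.le_of_succ_le_succ h)]
        simp
      · have hp : List.isPrefixOf [c] (c' :: t) = false := by
          simp [List.isPrefixOf]; intro hh; exact absurd hh.symm hc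
        rw [hp]
        simp only [Bool.false_eq_true, if_false]
        rw [ih _ _ (Nat.le_of_succ_le_succ h)]
        simp [hc]

theorem pv_replace_single (s : List Char) (c : Char) (new : List Char) :
    PySem.Chars.replace s [c] new = s.flatMap (fun x => if x = c then new else [x]) := by
  show (if ([c] : List Char).isEmpty = true then _ else PySem.Chars.replace.go [c] new s.length s []) = _
  rw [if_neg (by simp)]
  simpa using pv_go c new s.length s [] (le_refl _)

-- per-character agreement of A's composed replaces with B's table
theorem pv_point (c : Char) :
    List.flatMap
      (fun x =>
        List.flatMap
          (fun x =>
            List.flatMap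
              (fun x =>
                List.flatMap
                  (fun x =>
                    List.flatMap
                      (fun x =>
                        List.flatMap
                          (fun x =>
                            List.flatMap
                              (fun x =>
                                List.flatMap
                                  (fun x =>
                                    List.flatMap
                                      (fun x =>
                                        List.flatMap
                                          (fun x =>
                                            List.flatMap
                                              (fun x =>
                                                List.flatMap
                                                  (fun x =>
                                                    List.flatMap (fun x => if x = ' ' then [] else [x])
                                                      (if x = '.' then [] else [x]))
                                                  (if x = '-' then [] else [x]))
                                              (if x = '9' then "nine".toList else [x]))
                                          (if x = '8' then "eight".toList else [x]))
                                      (if x = '7' then "seven".toList else [x]))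
                                  (if x = '6' then "six".toList else [x]))
                              (if x = '5' then "five".toList else [x]))
                          (if x = '4' then "four".toList else [x]))
                      (if x = '3' then "three".toList else [x]))
                  (if x = '2' then "two".toList else [x]))
              (if x = '1' then "one".toList else [x]))
          (if x = '0' then "zero".toList else [x]))
      (if c = '_' then [] else [c])
  = pvTable c := by
  by_cases h : c ∈ ['_', '-', '.', ' ', '0', '1', '2', '3', '4', '5', '6', '7', '8', '9']
  · fin_cases h <;> decide
  · simp only [List.mem_cons, List.not_mem_nil, or_false] at h
    push Not at h
    obtain ⟨h1, h2, h3, h4, h5, h6, h7, h8, h9, h10, h11, h12, h13, h14⟩ := h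
    unfold pvTable
    simp [h1, h2, h3, h4, h5, h6, h7, h8, h9, h10, h11, h12, h13, h14]

-- the pre-guard strings agree: A's composed replaces = one pass through the table
theorem pv_core (name : String) :
    (PySem.Str.replace (PySem.Str.replace (PySem.Str.replace
       (pvNumberWords.items.foldl (fun s dw => PySem.Str.replace s dw.1 dw.2)
          (PySem.Str.replace name "_" "")) "-" "") "." "") " " "").toList
    = name.toList.flatMap pvTable := by
  have hi : pvNumberWords.items = [("0","zero"),("1","one"),("2","two"),("3","three"),("4","four"),
                     ("5","five"),("6","six"),("7","seven"),("8","eight"),("9","nine")] := by decide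
  rw [hi]
  simp only [List.foldl_cons, List.foldl_nil]
  simp only [PySem.Str.toList_replace]
  have t_ : ("_" : String).toList = ['_'] := rfl
  have t0 : ("0" : String).toList = ['0'] := rfl
  have t1 : ("1" : String).toList = ['1'] := rfl
  have t2 : ("2" : String).toList = ['2'] := rfl
  have t3 : ("3" : String).toList = ['3'] := rfl
  have t4 : ("4" : String).toList = ['4'] := rfl
  have t5 : ("5" : String).toList = ['5'] := rfl
  have t6 : ("6" : String).toList = ['6'] := rfl
  have t7 : ("7" : String).toList = ['7'] := rfl
  have t8 : ("8" : String).toList = ['8'] := rfl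
  have t9 : ("9" : String).toList = ['9'] := rfl
  have td : ("-" : String).toList = ['-'] := rfl
  have tp : ("." : String).toList = ['.'] := rfl
  have ts : (" " : String).toList = [' '] := rfl
  rw [t_, t0, t1, t2, t3, t4, t5, t6, t7, t8, t9, td, tp, ts]
  simp only [pv_replace_single]
  simp only [List.flatMap_assoc]
  exact List.flatMap_congr (fun x _ => pv_point x)

-- the guards agree once the core strings agree
theorem pv_guard (s : String) (l : List Char) (h : s.toList = l) :
    pvGuardA s = pvGuardB l := by
  unfold pvGuardA pvGuardB
  rw [h]
  cases l with
  | nil => simp [← h, String.ofList_toList]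
  | cons c t =>
    by_cases hc : PySem.Chars.isalpha c
    · simp [hc, ← h, String.ofList_toList]
    · simp [hc, h]

-- ===== VERDICT (by name: the statement is the Claim_ definition above) =====
theorem make_latex_safe_name_spec : Claim_equal_make_latex_safe_name := by
  intro name _
  show make_latex_safe_name name = make_latex_safe_name_alt name
  unfold make_latex_safe_name make_latex_safe_name_alt
  exact pv_guard _ _ (pv_core name)
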